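-- pv_equiv track=rewrite | github.com/Rajlus/magic-tg-card-generator | src/managers/card_validation_manager.py | get_card_colors
-- ===== SOURCE A (Python) =====
-- def get_card_colors(card_cost: str) -> set[str]:
--     """Extract colors from a card's mana cost."""
--     if not card_cost or card_cost == "-":
--         return set()
--
--     cost_str = str(card_cost).upper().replace("{", "").replace("}", "")
--     card_colors = set()
--
--     for color in ["W", "U", "B", "R", "G"]:
--         if color in cost_str:
--             card_colors.add(color)
--
--     return card_colors
-- ===== SOURCE B (Python) =====
-- def get_card_colors(card_cost: str) -> set[str]:
--     """Extract colors from a card's mana cost (single pass with boolean flags)."""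
--     if not card_cost or card_cost == "-":
--         return set()
--     w = u = b = r = g = False
--     for ch in str(card_cost).upper():
--         if ch == "W":
--             w = True
--         elif ch == "U":
--             u = True
--         elif ch == "B":
--             b = True
--         elif ch == "R":
--             r = True
--         elif ch == "G":
--             g = True
--     colors = set()
--     if w:
--         colors.add("W")
--     if u:
--         colors.add("U")
--     if b:
--         colors.add("B")
--     if r:
--         colors.add("R")
--     if g:
--         colors.add("G")
--     return colors
-- ===== Notes on version B (the rewrite author's own statement) =====
-- stated objective: alternative
-- what changed: One string-driven pass accumulating five boolean flags, then a flag-to-set assembly, instead of five per-color substring scans over a brace-stripped normalized copy.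
import Mathlib
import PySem

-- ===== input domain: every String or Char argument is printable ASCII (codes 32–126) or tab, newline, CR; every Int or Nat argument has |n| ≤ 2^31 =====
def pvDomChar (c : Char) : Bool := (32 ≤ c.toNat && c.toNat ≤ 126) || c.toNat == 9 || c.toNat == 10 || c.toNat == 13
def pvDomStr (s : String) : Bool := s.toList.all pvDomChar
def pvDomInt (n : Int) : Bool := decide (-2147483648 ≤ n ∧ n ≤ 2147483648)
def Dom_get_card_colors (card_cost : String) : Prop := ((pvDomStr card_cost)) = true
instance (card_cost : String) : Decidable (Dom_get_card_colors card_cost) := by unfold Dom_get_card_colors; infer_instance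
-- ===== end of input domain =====

-- B makes a single string-driven pass accumulating five boolean flags and assembles the set
-- from the flags, instead of A's five per-color substring scans over a brace-stripped copy.

-- ===== PORT A =====
def get_card_colors (card_cost : String) : List String :=
  if card_cost = "" ∨ card_cost = "-" then []
  else
    let cost_str := PySem.Str.replace (PySem.Str.replace (PySem.Str.upper card_cost) "{" "") "}" ""
    ["W", "U", "B", "R", "G"].foldl
      (fun card_colors color =>
        if PySem.Str.isIn color cost_str then PySem.Set.add card_colors color else card_colors)
      PySem.Set.empty

-- ===== PORT B =====
def get_card_colors_alt (card_cost : String) : List String :=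
  if card_cost = "" ∨ card_cost = "-" then []
  else
    let flags :=
      (PySem.Str.upper card_cost).toList.foldl
        (fun (st : Bool × Bool × Bool × Bool × Bool) ch =>
          let (w, u, b, r, g) := st
          if ch = 'W' then (true, u, b, r, g)
          else if ch = 'U' then (w, true, b, r, g)
          else if ch = 'B' then (w, u, true, r, g)
          else if ch = 'R' then (w, u, b, true, g)
          else if ch = 'G' then (w, u, b, r, true)
          else st)
        (false, false, false, false, false)
    let (w, u, b, r, g) := flags
    let colors := PySem.Set.empty
    let colors := if w then PySem.Set.add colors "W" else colors
    let colors := if u then PySem.Set.add colors "U" else colors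
    let colors := if b then PySem.Set.add colors "B" else colors
    let colors := if r then PySem.Set.add colors "R" else colors
    let colors := if g then PySem.Set.add colors "G" else colors
    colors

-- ===== PRECONDITION & SPEC =====
def Spec_get_card_colors (card_cost : String) (out : List String) : Prop := out = get_card_colors_alt card_cost
instance (card_cost : String) (out : List String) : Decidable (Spec_get_card_colors card_cost out) := by unfold Spec_get_card_colors; infer_instance

-- ===== CLAIM (what is proved, stated in full; the proofs are below) =====
def Claim_equal_get_card_colors : Prop := ∀ (card_cost : String), Dom_get_card_colors card_cost → Spec_get_card_colors card_cost (get_card_colors card_cost)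

-- ===== LEMMAS AND PROOFS =====

-- A's test 'color in cost_str' on a one-character string is character membership.
theorem isIn_singleton (c : Char) (l : List Char) :
    PySem.Chars.isIn [c] l = decide (c ∈ l) := by
  by_cases h : c ∈ l
  · have : [c] <:+: l := by
      obtain ⟨s, t, rfl⟩ := List.append_of_mem h
      exact ⟨s, t, by simp⟩
    simp [(PySem.Chars.isIn_iff_infix _ _).mpr this, h]
  · have : ¬ [c] <:+: l := fun hinf => h (hinf.subset (List.mem_singleton_self c))
    simp [(PySem.Chars.isIn_eq_false_iff _ _).mpr this, h]

-- Python's s.replace(a, "") for a single character a is character filtering.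
theorem replace_go_single (a : Char) :
    ∀ (fuel : Nat) (l acc : List Char), l.length ≤ fuel →
      PySem.Chars.replace.go [a] [] fuel l acc = acc.reverse ++ l.filter (fun c => !(c == a)) := by
  intro fuel
  induction fuel with
  | zero =>
    intro l acc h
    have : l = [] := List.length_eq_zero_iff.mp (Nat.le_zero.mp h)
    subst this; simp [PySem.Chars.replace.go]
  | succ n ih =>
    intro l acc h
    cases l with
    | nil => simp [PySem.Chars.replace.go]
    | cons c t =>
      simp only [List.length_cons, Nat.succ_le_succ_iff] at h
      by_cases hc : c = a
      · subst hc
        have hp : [c].isPrefixOf (c :: t) = true := by simp [List.isPrefixOf]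
        simp [PySem.Chars.replace.go, hp, ih t acc h, List.filter]
      · have hp : [a].isPrefixOf (c :: t) = false := by
          simp [List.isPrefixOf]; intro h'; exact absurd h'.symm hc
        have hk : List.filter (fun c => !(c == a)) (c :: t)
            = c :: List.filter (fun c => !(c == a)) t :=
          List.filter_cons_of_pos (by simp [hc])
        simp [PySem.Chars.replace.go, hp, ih t (c :: acc) h, hk]

theorem replace_single (a : Char) (l : List Char) :
    PySem.Chars.replace l [a] [] = l.filter (fun c => !(c == a)) := by
  simp [PySem.Chars.replace, replace_go_single a l.length l [] le_rfl]

-- A's per-color test on the brace-stripped uppercased string is character membership in the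
-- uppercased string (colors are not braces).
theorem isIn_stripped (c : Char) (hc1 : c ≠ '{') (hc2 : c ≠ '}') (u : List Char) :
    PySem.Chars.isIn [c] (PySem.Chars.replace (PySem.Chars.replace u ['{'] []) ['}'] [])
      = decide (c ∈ u) := by
  rw [isIn_singleton]
  simp [replace_single, List.mem_filter, hc1, hc2]

-- B's flag fold computes, for each color, whether it occurs in the traversed characters.
theorem flags_spec :
    ∀ (l : List Char) (w u b r g : Bool),
      l.foldl
        (fun (st : Bool × Bool × Bool × Bool × Bool) ch =>
          let (w, u, b, r, g) := st
          if ch = 'W' then (true, u, b, r, g)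
          else if ch = 'U' then (w, true, b, r, g)
          else if ch = 'B' then (w, u, true, r, g)
          else if ch = 'R' then (w, u, b, true, g)
          else if ch = 'G' then (w, u, b, r, true)
          else st)
        (w, u, b, r, g)
      = (w || decide ('W' ∈ l), u || decide ('U' ∈ l), b || decide ('B' ∈ l),
         r || decide ('R' ∈ l), g || decide ('G' ∈ l)) := by
  intro l
  induction l with
  | nil => intro w u b r g; simp
  | cons c t ih =>
    intro w u b r g
    by_cases hW : c = 'W'
    · subst hW; simp [List.foldl, ih, List.mem_cons]
    · by_cases hU : c = 'U'
      · subst hU; simp [List.foldl, ih, List.mem_cons]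
      · by_cases hB : c = 'B'
        · subst hB; simp [List.foldl, ih, List.mem_cons]
        · by_cases hR : c = 'R'
          · subst hR; simp [List.foldl, ih, List.mem_cons]
          · by_cases hG : c = 'G'
            · subst hG; simp [List.foldl, ih, List.mem_cons]
            · simp [List.foldl, hW, hU, hB, hR, hG, ih, List.mem_cons,
                Ne.symm hW, Ne.symm hU, Ne.symm hB, Ne.symm hR, Ne.symm hG]

-- ===== VERDICT (by name: the statement is the Claim_ definition above) =====
theorem get_card_colors_spec : Claim_equal_get_card_colors := by
  intro card_cost _
  unfold Spec_get_card_colors get_card_colors get_card_colors_alt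
  by_cases hg : card_cost = "" ∨ card_cost = "-"
  · simp [hg]
  · simp only [hg, if_false]
    set u := (PySem.Str.upper card_cost).toList with hu
    have hA : (PySem.Str.replace (PySem.Str.replace (PySem.Str.upper card_cost) "{" "") "}" "").toList
        = PySem.Chars.replace (PySem.Chars.replace u ['{'] []) ['}'] [] := by
      simp [PySem.Str.replace, hu]
    simp only [List.foldl, flags_spec, Bool.false_or, PySem.Str.isIn, hA,
      show ("W" : String).toList = ['W'] from by decide,
      show ("U" : String).toList = ['U'] from by decide,
      show ("B" : String).toList = ['B'] from by decide,
      show ("R" : String).toList = ['R'] from by decide,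
      show ("G" : String).toList = ['G'] from by decide,
      isIn_stripped 'W' (by decide) (by decide),
      isIn_stripped 'U' (by decide) (by decide),
      isIn_stripped 'B' (by decide) (by decide),
      isIn_stripped 'R' (by decide) (by decide),
      isIn_stripped 'G' (by decide) (by decide)]
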